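-- pv_equiv track=rewrite | github.com/FerdmanAriel/computer_science | hw2_209224120.py | semi_perfect_4
-- ===== SOURCE A (Python) =====
-- def divisors(n):
--
--     return [ i for i in range(1,n+1//2) if n%i==0 ]
--
-- def semi_perfect_4(n):
--
--     count = 0
--     left = n
--
--     if sum(divisors(n)) >= n:
--         for i in divisors(n)[::-1]:
--             if left - i >= 0:
--                 count += 1
--                 left -= i
--     return left == 0 and count == 4
-- ===== SOURCE B (Python) =====
-- def semi_perfect_4(n):
--     # Enumerate proper divisors in O(sqrt(n)) pairs, sort descending, run the same greedy.
--     if n < 1: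
--         return False
--     divs = set()
--     i = 1
--     while i * i <= n:
--         if n % i == 0:
--             divs.add(i)
--             divs.add(n // i)
--         i += 1
--     divs.discard(n)
--     count = 0
--     left = n
--     for d in sorted(divs, reverse=True):
--         if left - d >= 0:
--             count += 1
--             left -= d
--     return left == 0 and count == 4
-- ===== Notes on version B (the rewrite author's own statement) =====
-- stated objective: faster
-- what changed: A builds the divisor list twice by an O(n) scan of range(1, n); B enumerates divisor pairs (i, n//i) once up to sqrt(n) into a set, sorts them descending, and runs the same greedy.
import Mathlib
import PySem

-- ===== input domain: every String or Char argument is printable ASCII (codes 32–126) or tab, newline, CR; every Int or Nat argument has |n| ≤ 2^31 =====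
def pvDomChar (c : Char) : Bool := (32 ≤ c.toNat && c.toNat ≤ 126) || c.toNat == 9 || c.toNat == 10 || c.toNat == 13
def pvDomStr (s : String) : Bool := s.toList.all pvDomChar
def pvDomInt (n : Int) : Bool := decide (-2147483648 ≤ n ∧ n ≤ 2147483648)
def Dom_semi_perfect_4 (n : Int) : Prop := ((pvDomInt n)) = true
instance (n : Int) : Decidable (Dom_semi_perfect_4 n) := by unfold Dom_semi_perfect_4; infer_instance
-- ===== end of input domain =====

-- B replaces A's two O(n) divisor scans by one O(√n) paired divisor enumeration,
-- then runs the same greedy; objective: faster (asymptotic).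

-- shared transliteration of the identical final line 'return left == 0 and count == 4'
def pyReturn4 (cl : Int × Int) : Bool := decide (cl.2 = 0) && decide (cl.1 = 4)

-- ===== PORT A =====
-- divisors(n) = [i for i in range(1, n + 1//2) if n % i == 0]   (note 1//2 = 0)
def divisorsA (n : Int) : List Int :=
  (PySem.List.pyRange 1 (n + PySem.Int.floordiv 1 2) 1).filter
    (fun i => PySem.Int.mod n i == 0)

def semi_perfect_4 (n : Int) : Bool :=
  -- count = 0; left = n; if sum(divisors(n)) >= n: for i in divisors(n)[::-1]: …
  pyReturn4
    (if (divisorsA n).sum ≥ n then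
      ((divisorsA n).reverse).foldl
        (fun (cl : Int × Int) i => if cl.2 - i ≥ 0 then (cl.1 + 1, cl.2 - i) else cl)
        (0, n)
    else (0, n))

-- ===== PORT B =====
-- while i*i <= n: if n % i == 0: divs.add(i); divs.add(n // i); i += 1
def altDivLoop (n i : Int) (s : PySem.Set Int) : PySem.Set Int :=
  if h : i * i ≤ n then
    altDivLoop n (i + 1)
      (if PySem.Int.mod n i == 0 then
        PySem.Set.add (PySem.Set.add s i) (PySem.Int.floordiv n i)
      else s)
  else s
termination_by (n + 1 - i).toNat
decreasing_by
  have h2 : 0 ≤ i * (i - 1) := by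
    rcases (by omega : i ≤ 0 ∨ 1 ≤ i) with h0 | h0 <;> nlinarith
  have h3 : i * (i - 1) = i * i - i := by ring
  omega

def semi_perfect_4_alt (n : Int) : Bool :=
  if n < 1 then false
  else
    pyReturn4
      ((PySem.List.sorted (PySem.Set.discard (altDivLoop n 1 PySem.Set.empty) n)
          (fun x => x) true).foldl
        (fun (cl : Int × Int) d => if cl.2 - d ≥ 0 then (cl.1 + 1, cl.2 - d) else cl)
        (0, n))

-- ===== PRECONDITION & SPEC =====
def Spec_semi_perfect_4 (n : Int) (out : Bool) : Prop := out = semi_perfect_4_alt n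
instance (n : Int) (out : Bool) : Decidable (Spec_semi_perfect_4 n out) := by unfold Spec_semi_perfect_4; infer_instance

-- ===== CLAIM (what is proved, stated in full; the proofs are below) =====
def Claim_equal_semi_perfect_4 : Prop := ∀ (n : Int), Dom_semi_perfect_4 n → Spec_semi_perfect_4 n (semi_perfect_4 n)

-- ===== LEMMAS AND PROOFS =====

theorem mem_altDivLoop (n i : Int) (s : PySem.Set Int) :
    1 ≤ i → s.Nodup →
      (altDivLoop n i s).Nodup ∧
      ∀ d : Int, (d ∈ altDivLoop n i s ↔
        d ∈ s ∨ ∃ j, i ≤ j ∧ j * j ≤ n ∧ PySem.Int.mod n j = 0 ∧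
          (d = j ∨ d = PySem.Int.floordiv n j)) := by
  induction i, s using altDivLoop.induct n with
  | case1 i s h ih =>
    intro hi hs
    rw [altDivLoop, dif_pos h]
    simp only [dite_eq_ite] at ih
    have hs' : (if PySem.Int.mod n i == 0 then
        PySem.Set.add (PySem.Set.add s i) (PySem.Int.floordiv n i) else s).Nodup := by
      split
      · exact PySem.Set.nodup_add _ _ (PySem.Set.nodup_add _ _ hs)
      · exact hs
    obtain ⟨hnd, hmem⟩ := ih (by omega) hs'
    refine ⟨hnd, fun d => ?_⟩
    rw [hmem d]
    by_cases hm : PySem.Int.mod n i = 0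
    · simp only [hm, beq_self_eq_true, if_true, PySem.Set.mem_add]
      constructor
      · rintro (((hd | rfl) | rfl) | ⟨j, hj1, hj2, hj3, hj4⟩)
        · exact Or.inl hd
        · exact Or.inr ⟨d, le_refl _, h, hm, Or.inl rfl⟩
        · exact Or.inr ⟨i, le_refl _, h, hm, Or.inr rfl⟩
        · exact Or.inr ⟨j, by omega, hj2, hj3, hj4⟩
      · rintro (hd | ⟨j, hj1, hj2, hj3, hj4⟩)
        · exact Or.inl (Or.inl (Or.inl hd))
        · rcases eq_or_lt_of_le hj1 with rfl | hlt
          · rcases hj4 with rfl | rfl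
            · exact Or.inl (Or.inl (Or.inr rfl))
            · exact Or.inl (Or.inr rfl)
          · exact Or.inr ⟨j, by omega, hj2, hj3, hj4⟩
    · have hmf : (PySem.Int.mod n i == 0) = false := by simp [hm]
      simp only [hmf, Bool.false_eq_true, if_false]
      constructor
      · rintro (hd | ⟨j, hj1, hj2, hj3, hj4⟩)
        · exact Or.inl hd
        · exact Or.inr ⟨j, by omega, hj2, hj3, hj4⟩
      · rintro (hd | ⟨j, hj1, hj2, hj3, hj4⟩)
        · exact Or.inl hd
        · rcases eq_or_lt_of_le hj1 with rfl | hlt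
          · exact absurd hj3 hm
          · exact Or.inr ⟨j, by omega, hj2, hj3, hj4⟩
  | case2 i s h =>
    intro hi hs
    rw [altDivLoop, dif_neg h]
    refine ⟨hs, fun d => ?_⟩
    constructor
    · exact Or.inl
    · rintro (hd | ⟨j, hj1, hj2, hj3, hj4⟩)
      · exact hd
      · refine absurd ?_ h
        have hjj : i * i ≤ j * j := by nlinarith
        linarith

-- For 1 ≤ n, the √n pair enumeration hits exactly the divisors 1 ≤ d ≤ n.
theorem pair_enum_char (n d : Int) (hn : 1 ≤ n) :
    (∃ j, 1 ≤ j ∧ j * j ≤ n ∧ PySem.Int.mod n j = 0 ∧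
      (d = j ∨ d = PySem.Int.floordiv n j)) ↔ (1 ≤ d ∧ d ≤ n ∧ d ∣ n) := by
  constructor
  · rintro ⟨j, hj1, hj2, hj3, hj4⟩
    have hjd : j ∣ n := (PySem.Int.mod_eq_zero_iff_dvd n j).mp hj3
    have hfd : PySem.Int.floordiv n j = n / j := PySem.Int.floordiv_eq_ediv_of_pos (by omega)
    have hq : n / j * j = n := Int.ediv_mul_cancel hjd
    have hq1 : 1 ≤ n / j := by nlinarith
    rcases hj4 with rfl | rfl
    · exact ⟨hj1, by nlinarith, hjd⟩
    · rw [hfd]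
      exact ⟨hq1, by nlinarith, Dvd.intro j (by linarith)⟩
  · rintro ⟨hd1, hd2, hdvd⟩
    by_cases hsq : d * d ≤ n
    · exact ⟨d, hd1, hsq, (PySem.Int.mod_eq_zero_iff_dvd n d).mpr hdvd, Or.inl rfl⟩
    · obtain ⟨k, hk⟩ := hdvd
      have hk1 : 1 ≤ k := by nlinarith
      have hkd : n / d = k := by rw [hk, Int.mul_ediv_cancel_left _ (by omega : d ≠ 0)]
      refine ⟨k, hk1, by nlinarith, ?_, Or.inr ?_⟩
      · exact (PySem.Int.mod_eq_zero_iff_dvd n k).mpr ⟨d, by linarith [hk]⟩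
      · have hfd : PySem.Int.floordiv n k = n / k :=
          PySem.Int.floordiv_eq_ediv_of_pos (by omega)
        rw [hfd, hk, mul_comm, Int.mul_ediv_cancel_left _ (by omega : k ≠ 0)]
-- B's sorted descending divisor set is exactly A's filtered range, reversed.
theorem sorted_set_eq_reverse_divisorsA (n : Int) (hn : 1 ≤ n) :
    PySem.List.sorted (PySem.Set.discard (altDivLoop n 1 PySem.Set.empty) n)
      (fun x => x) true = (divisorsA n).reverse := by
  have h10 : PySem.Int.floordiv 1 2 = 0 := by decide
  obtain ⟨hnd, hmem⟩ :=
    mem_altDivLoop n 1 PySem.Set.empty (le_refl 1) (by simp [PySem.Set.empty])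
  apply PySem.List.sorted_rev_eq_of_perm_of_pairwise_gt
  · -- permutation: both nodup, same membership
    have h1 : (divisorsA n).reverse.Nodup := by
      unfold divisorsA
      exact List.nodup_reverse.mpr ((PySem.List.nodup_pyRange_one _ _).filter _)
    rw [List.perm_ext_iff_of_nodup h1 (PySem.Set.nodup_discard _ _ hnd)]
    intro d
    rw [List.mem_reverse, PySem.Set.mem_discard, hmem d]
    unfold divisorsA
    rw [List.mem_filter]
    simp only [PySem.Set.empty, List.not_mem_nil, false_or, h10, add_zero,
      PySem.List.mem_pyRange_one, beq_iff_eq]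
    rw [pair_enum_char n d hn, PySem.Int.mod_eq_zero_iff_dvd]
    constructor
    · rintro ⟨⟨h1, h2⟩, h3⟩
      exact ⟨⟨h1, by omega, h3⟩, by omega⟩
    · rintro ⟨⟨h1, h2, h3⟩, hne⟩
      exact ⟨⟨h1, by omega⟩, h3⟩
  · -- strictly decreasing
    exact List.Pairwise.reverse
      (List.Pairwise.filter _ (PySem.List.pairwise_lt_pyRange_one 1 _))

-- The greedy over nonnegative values never drops left below l - sum.
theorem fold_left_ge (L : List Int) (hL : ∀ x ∈ L, 0 ≤ x) (c l : Int) :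
    (L.foldl (fun (cl : Int × Int) d => if cl.2 - d ≥ 0 then (cl.1 + 1, cl.2 - d) else cl)
      (c, l)).2 ≥ l - L.sum := by
  induction L generalizing c l with
  | nil => simp
  | cons x xs ih =>
    have hx : 0 ≤ x := hL x (by simp)
    have hxs : ∀ y ∈ xs, 0 ≤ y := fun y hy => hL y (by simp [hy])
    simp only [List.foldl_cons, List.sum_cons]
    by_cases h : l - x ≥ 0
    · simp only [if_pos h]
      have := ih hxs (c + 1) (l - x)
      omega
    · simp only [if_neg h]
      have := ih hxs c l
      omega

-- ===== VERDICT (by name: the statement is the Claim_ definition above) =====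
theorem semi_perfect_4_spec : Claim_equal_semi_perfect_4 := by
  intro n _
  unfold Spec_semi_perfect_4
  have h10 : PySem.Int.floordiv 1 2 = 0 := by decide
  by_cases hn : n < 1
  · -- A: divisors is empty, greedy leaves (0, n); count = 0 ≠ 4 so A is false; B is false by its guard
    unfold semi_perfect_4 semi_perfect_4_alt divisorsA
    rw [h10, add_zero, PySem.List.pyRange_one_eq_nil (by omega)]
    simp [pyReturn4, hn, (by omega : n ≤ 0)]
  · replace hn : 1 ≤ n := by omega
    have hlist := sorted_set_eq_reverse_divisorsA n hn
    unfold semi_perfect_4 semi_perfect_4_alt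
    rw [hlist, if_neg (by omega : ¬ n < 1)]
    by_cases hsum : (divisorsA n).sum ≥ n
    · rw [if_pos hsum]
    · -- A skips the loop and returns false; B's greedy keeps left ≥ n - sum > 0
      rw [if_neg hsum]
      have hpos : ∀ x ∈ (divisorsA n).reverse, 0 ≤ x := by
        intro x hx
        rw [List.mem_reverse] at hx
        unfold divisorsA at hx
        have := (List.mem_filter.mp hx).1
        rw [PySem.List.mem_pyRange_one] at this
        omega
      have h := fold_left_ge ((divisorsA n).reverse) hpos 0 n
      rw [List.sum_reverse] at h
      have hne : ((divisorsA n).reverse.foldl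
          (fun (cl : Int × Int) d => if cl.2 - d ≥ 0 then (cl.1 + 1, cl.2 - d) else cl)
          (0, n)).2 ≠ 0 := by omega
      unfold pyReturn4
      rw [decide_eq_false hne]
      simp
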